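-- pv_equiv track=rewrite | github.com/dominiqueNeff/VSM_Information_Retrieval_Game_Reviews | funktionen.py | calculateScore1
-- ===== SOURCE A (Python) =====
-- def calculateScore1(index, query):
--     scores = []
--     qterms = query.split(' ')
--     for ind in index:
--         score = 0
--         for t in qterms:
--             for dt in ind:
--                 if t == dt:
--                     score = score + 1
--                     break
--         scores.append(score)
--     return scores
-- ===== SOURCE B (Python) =====
-- def calculateScore1(index, query):
--     qcount = {}
--     for t in query.split(' '):
--         qcount[t] = qcount.get(t, 0) + 1
--     return [sum(c for term, c in qcount.items() if term in set(ind)) for ind in index]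
-- ===== Notes on version B (the rewrite author's own statement) =====
-- stated objective: alternative
-- what changed: B builds a query-term frequency table once, then scores each document by summing the multiplicities of the distinct query terms present in the document's member set, replacing A's per-occurrence nested scan with break.
import Mathlib
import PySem

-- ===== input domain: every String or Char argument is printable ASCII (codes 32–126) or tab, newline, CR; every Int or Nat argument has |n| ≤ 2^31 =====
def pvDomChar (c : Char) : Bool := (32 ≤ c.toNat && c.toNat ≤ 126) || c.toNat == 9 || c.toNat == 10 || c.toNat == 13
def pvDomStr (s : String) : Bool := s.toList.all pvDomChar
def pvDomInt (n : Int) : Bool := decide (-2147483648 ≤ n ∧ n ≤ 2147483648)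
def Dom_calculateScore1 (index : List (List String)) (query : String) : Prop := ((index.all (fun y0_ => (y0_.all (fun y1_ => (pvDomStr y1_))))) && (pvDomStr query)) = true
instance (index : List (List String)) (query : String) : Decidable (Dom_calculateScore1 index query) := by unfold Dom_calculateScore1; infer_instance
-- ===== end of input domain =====

-- B replaces A's per-occurrence nested scan (break on first match) with a query-term
-- frequency table plus a per-document membership set (alternative decomposition).


-- ===== PORT A =====
-- inner 'for dt in ind: if t == dt: score = score + 1; break'
def pvInnerA (t : String) (ind : List String) (score : Int) : Int :=
  match ind with
  | [] => score
  | dt :: rest => if t = dt then score + 1 else pvInnerA t rest score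

-- query.split(' ') with a non-empty separator never raises: split? = some, getD is exact
def calculateScore1 (index : List (List String)) (query : String) : List Int :=
  let qterms := (PySem.Str.split? query " ").getD []
  index.foldl (fun scores ind =>
    scores ++ [qterms.foldl (fun score t => pvInnerA t ind score) 0]) []

-- ===== PORT B =====
def calculateScore1_alt (index : List (List String)) (query : String) : List Int :=
  let qcount := ((PySem.Str.split? query " ").getD []).foldl
    (fun d t => d.insert t (d.getD t 0 + 1)) PySem.Dict.empty
  index.map (fun ind =>
    let docset : PySem.Set String := PySem.Set.ofList ind
    qcount.items.foldl (fun s p => if PySem.Set.contains docset p.1 then s + p.2 else s) 0)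

-- ===== PRECONDITION & SPEC =====
def Spec_calculateScore1 (index : List (List String)) (query : String) (out : List Int) : Prop := out = calculateScore1_alt index query
instance (index : List (List String)) (query : String) (out : List Int) : Decidable (Spec_calculateScore1 index query out) := by unfold Spec_calculateScore1; infer_instance

-- ===== CLAIM (what is proved, stated in full; the proofs are below) =====
def Claim_equal_calculateScore1 : Prop := ∀ (index : List (List String)) (query : String), Dom_calculateScore1 index query → Spec_calculateScore1 index query (calculateScore1 index query)

-- ===== LEMMAS AND PROOFS =====

-- A's inner break-loop adds 1 iff t occurs in ind
theorem pvInnerA_eq (t : String) (ind : List String) (score : Int) :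
    pvInnerA t ind score = score + (if t ∈ ind then 1 else 0) := by
  induction ind with
  | nil => simp [pvInnerA]
  | cons dt rest ih =>
    by_cases h : t = dt <;> simp [pvInnerA, h, ih]

-- sum over a Nodup list of an 'if k ∈ ind ∧ k = t' indicator
theorem pv_sum_indicator (L : List String) (ind : List String) (t : String)
    (hN : L.Nodup) (ht : t ∈ L) :
    (L.map (fun k => if k ∈ ind ∧ k = t then (1 : Int) else 0)).sum
      = (if t ∈ ind then 1 else 0) := by
  induction L with
  | nil => cases ht
  | cons a rest ih =>
    have hN' := List.nodup_cons.mp hN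
    by_cases he : a = t
    · subst he
      have hzero : (rest.map (fun k => if k ∈ ind ∧ k = a then (1 : Int) else 0)).sum = 0 := by
        apply List.sum_eq_zero
        intro x hx
        obtain ⟨k, hk, rfl⟩ := List.mem_map.mp hx
        have hka : ¬ (k ∈ ind ∧ k = a) := by rintro ⟨-, rfl⟩; exact hN'.1 hk
        simp [hka]
      by_cases hm : a ∈ ind <;> simp [hm, hzero]
    · have ht' : t ∈ rest := by
        rcases List.mem_cons.mp ht with h | h
        · exact absurd h.symm he
        · exact h
      have hna : ¬ (a ∈ ind ∧ a = t) := by rintro ⟨-, rfl⟩; exact he rfl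
      simp [hna, ih hN'.2 ht']

-- the counted-and-filtered sum over distinct keys equals the per-occurrence sum
theorem pv_sum_count (L q ind : List String) (hN : L.Nodup) (hq : ∀ t ∈ q, t ∈ L) :
    (L.map (fun k => if k ∈ ind then (q.count k : Int) else 0)).sum
      = (q.map (fun t => if t ∈ ind then (1 : Int) else 0)).sum := by
  induction q with
  | nil => simp
  | cons t rest ih =>
    have hrest : ∀ x ∈ rest, x ∈ L := fun x hx => hq x (List.mem_cons_of_mem _ hx)
    have ht : t ∈ L := hq t List.mem_cons_self
    have hsplit : (L.map (fun k => if k ∈ ind then (((t :: rest).count k : Nat) : Int) else 0)).sum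
        = (L.map (fun k => if k ∈ ind then (rest.count k : Int) else 0)).sum
          + (L.map (fun k => if k ∈ ind ∧ k = t then (1 : Int) else 0)).sum := by
      rw [← List.sum_map_add]
      apply congrArg
      apply List.map_congr_left
      intro k _
      simp only [List.count_cons]
      by_cases he : k = t
      · subst he
        by_cases hm : k ∈ ind
        · simp [hm]
        · simp [hm]
      · have he' : ¬ t = k := fun h => he h.symm
        by_cases hm : k ∈ ind <;> simp [hm, he, he']
    rw [hsplit, ih hrest, pv_sum_indicator L ind t hN ht]
    simp [add_comm]

theorem calculateScore1_spec_aux (index : List (List String)) (query : String) :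
    calculateScore1 index query = calculateScore1_alt index query := by
  unfold calculateScore1 calculateScore1_alt
  rw [PySem.Dict.foldl_insert_getD_add_one_eq_counter]
  set qterms := (PySem.Str.split? query " ").getD [] with hq
  rw [PySem.List.foldl_append_singleton_eq_map]
  simp only [List.nil_append]
  apply List.map_congr_left
  intro ind _
  -- A side: per-occurrence sum
  have hA : qterms.foldl (fun score t => pvInnerA t ind score) 0
      = (qterms.map (fun t => if t ∈ ind then (1 : Int) else 0)).sum := by
    have hfun : (fun (score : Int) (t : String) => pvInnerA t ind score)
        = fun score t => score + (if t ∈ ind then (1 : Int) else 0) :=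
      funext fun s => funext fun t => pvInnerA_eq t ind s
    have h : ∀ (l : List String) (s : Int),
        l.foldl (fun score t => score + (if t ∈ ind then (1 : Int) else 0)) s
          = s + (l.map (fun t => if t ∈ ind then (1 : Int) else 0)).sum := by
      intro l
      induction l with
      | nil => simp
      | cons a rest ihl =>
        intro s
        simp only [List.foldl_cons, List.map_cons, List.sum_cons, ihl]
        ring
    rw [hfun]
    simpa using h qterms 0
  -- B side: sum over counter items
  rw [hA, PySem.Dict.items_counter]
  rw [show (fun (s : Int) (p : String × Int) =>
        if PySem.Set.contains (PySem.Set.ofList ind) p.1 then s + p.2 else s)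
      = (fun s p => if p.1 ∈ ind then s + p.2 else s) by
    funext s p
    by_cases h : p.1 ∈ ind <;>
      simp [PySem.Set.mem_ofList, h]]
  have hfold : ∀ (l : List (String × Int)) (s : Int),
      l.foldl (fun s p => if p.1 ∈ ind then s + p.2 else s) s
        = s + (l.map (fun p => if p.1 ∈ ind then p.2 else 0)).sum := by
    intro l
    induction l with
    | nil => simp
    | cons a rest ihl =>
      intro s
      by_cases h : a.1 ∈ ind <;> simp [h, ihl] <;> ring
  rw [hfold]
  simp only [List.map_map]
  have hcomp : ((fun p : String × Int => if p.1 ∈ ind then p.2 else 0) ∘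
      fun k => (k, (qterms.count k : Int)))
      = fun k => if k ∈ ind then (qterms.count k : Int) else 0 := rfl
  rw [hcomp, pv_sum_count (PySem.Set.ofList qterms) qterms ind
        (PySem.Set.nodup_ofList qterms) (fun t ht => (PySem.Set.mem_ofList qterms t).mpr ht)]
  simp

-- ===== VERDICT (by name: the statement is the Claim_ definition above) =====
theorem calculateScore1_spec : Claim_equal_calculateScore1 := by
  intro index query _
  exact calculateScore1_spec_aux index query
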